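-- pv_equiv track=rewrite | github.com/kitanoyoru/compscie | leetcode/1458. Max Dot Product of Two Subsequences/main.py | maxDotProduct
-- ===== SOURCE A (Python) =====
-- from typing import List
--
-- def maxDotProduct(nums1: List[int], nums2: List[int]) -> int:
--     n, m = len(nums1), len(nums2)
--     dp = [[0] * m for _ in range(n)]
--
--     dp[0][0] = nums1[0] * nums2[0]
--     for i in range(1, n):
--         dp[i][0] = max(dp[i - 1][0], nums1[i] * nums2[0])
--     for i in range(1, m):
--         dp[0][i] = max(dp[0][i - 1], nums1[0] * nums2[i])
--     for i in range(1, n):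
--         for j in range(1, m):
--             dp[i][j] = max(
--                 dp[i - 1][j],
--                 dp[i][j - 1],
--                 dp[i - 1][j - 1] + nums1[i] * nums2[j],
--                 nums1[i] * nums2[j],
--             )
--
--     return dp[n - 1][m - 1]
-- ===== SOURCE B (Python) =====
-- from typing import List
--
-- def maxDotProduct(nums1: List[int], nums2: List[int]) -> int:
--     # top-down recursion over index pairs, memoized in a dict;
--     # None means "no nonempty subsequence pair available" (empty prefix)
--     memo = {}
--
--     def dp(i, j):
--         if i < 0 or j < 0:
--             return None
--         key = (i, j)
--         if key not in memo:
--             best = nums1[i] * nums2[j]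
--             d = dp(i - 1, j - 1)
--             if d is not None and d > 0:
--                 best += d
--             u = dp(i - 1, j)
--             if u is not None and u > best:
--                 best = u
--             l = dp(i, j - 1)
--             if l is not None and l > best:
--                 best = l
--             memo[key] = best
--         return memo[key]
--
--     return dp(len(nums1) - 1, len(nums2) - 1)
-- ===== Notes on version B (the rewrite author's own statement) =====
-- stated objective: alternative
-- what changed: Replaced A's bottom-up n-by-m table fill with three separate boundary-initialisation loops by a top-down recursion over index pairs memoized in a dict, with None ('no pair chosen yet') as the base case so no boundary special-casing is needed.
import Mathlib
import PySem

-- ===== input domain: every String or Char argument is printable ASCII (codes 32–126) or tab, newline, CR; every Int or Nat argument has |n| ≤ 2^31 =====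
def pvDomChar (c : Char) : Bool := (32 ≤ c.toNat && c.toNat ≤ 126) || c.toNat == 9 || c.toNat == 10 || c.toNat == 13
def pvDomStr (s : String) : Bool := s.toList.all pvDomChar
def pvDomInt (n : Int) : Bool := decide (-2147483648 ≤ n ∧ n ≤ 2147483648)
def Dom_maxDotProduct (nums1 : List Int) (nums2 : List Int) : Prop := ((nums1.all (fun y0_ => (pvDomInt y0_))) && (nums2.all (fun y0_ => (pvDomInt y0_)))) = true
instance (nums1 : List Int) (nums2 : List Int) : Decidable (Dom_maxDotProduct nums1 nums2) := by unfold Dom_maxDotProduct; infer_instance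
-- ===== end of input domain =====

-- B replaces A's bottom-up table fill (three boundary loops + nested fill) by a top-down
-- recursion over index pairs (memoized by a dict in Source B), None = "no pair available";
-- return values agree on all nonempty inputs.

-- ===== PORT A =====
-- dp[i][j] read: exact for the nonnegative in-range indices A's loops use
def pvGet2 (dp : List (List Int)) (i j : Int) : Int :=
  (PySem.List.pyGet? ((PySem.List.pyGet? dp i).getD []) j).getD 0

-- dp[i][j] = v write: exact for the nonnegative in-range indices A's loops use
def pvSet2 (dp : List (List Int)) (i j : Int) (v : Int) : List (List Int) :=
  dp.set i.toNat (((PySem.List.pyGet? dp i).getD []).set j.toNat v)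

def maxDotProduct (nums1 : List Int) (nums2 : List Int) : Int :=
  let n : Int := nums1.length
  let m : Int := nums2.length
  let dp : List (List Int) := List.replicate n.toNat (List.replicate m.toNat 0)
  let dp := pvSet2 dp 0 0 (PySem.List.pyGetD nums1 0 0 * PySem.List.pyGetD nums2 0 0)
  let dp := (PySem.List.pyRange 1 n 1).foldl (fun dp i =>
      pvSet2 dp i 0 (max (pvGet2 dp (i-1) 0)
        (PySem.List.pyGetD nums1 i 0 * PySem.List.pyGetD nums2 0 0))) dp
  let dp := (PySem.List.pyRange 1 m 1).foldl (fun dp i =>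
      pvSet2 dp 0 i (max (pvGet2 dp 0 (i-1))
        (PySem.List.pyGetD nums1 0 0 * PySem.List.pyGetD nums2 i 0))) dp
  let dp := (PySem.List.pyRange 1 n 1).foldl (fun dp i =>
      (PySem.List.pyRange 1 m 1).foldl (fun dp j =>
        pvSet2 dp i j (max (max (max (pvGet2 dp (i-1) j) (pvGet2 dp i (j-1)))
            (pvGet2 dp (i-1) (j-1) + PySem.List.pyGetD nums1 i 0 * PySem.List.pyGetD nums2 j 0))
            (PySem.List.pyGetD nums1 i 0 * PySem.List.pyGetD nums2 j 0))) dp) dp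
  pvGet2 dp (n-1) (m-1)

-- ===== PORT B =====
-- Source B's inner function dp(i, j): Option Int plays Python's "int or None";
-- the dict memo is pure caching (same recursion, same values), so the port is the recursion itself.
def altDp (a b : List Int) (i j : Int) : Option Int :=
  if i < 0 ∨ j < 0 then none
  else
    let best := PySem.List.pyGetD a i 0 * PySem.List.pyGetD b j 0
    let best := match altDp a b (i-1) (j-1) with
      | some d => if d > 0 then best + d else best
      | none => best
    let best := match altDp a b (i-1) j with
      | some u => if u > best then u else best
      | none => best
    let best := match altDp a b i (j-1) with
      | some l => if l > best then l else best
      | none => best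
    some best
termination_by ((i+1).toNat + (j+1).toNat)
decreasing_by all_goals omega

def maxDotProduct_alt (nums1 : List Int) (nums2 : List Int) : Int :=
  match altDp nums1 nums2 ((nums1.length : Int) - 1) ((nums2.length : Int) - 1) with
  | some v => v
  | none => 0   -- Python returns None here (an empty input list); outside Pre_

-- ===== PRECONDITION & SPEC =====
-- Pre_ excludes empty nums1 or nums2, on which A raises (IndexError) and B returns None (not an int).
def Pre_maxDotProduct (nums1 : List Int) (nums2 : List Int) : Prop :=
  nums1 ≠ [] ∧ nums2 ≠ []
instance (nums1 : List Int) (nums2 : List Int) : Decidable (Pre_maxDotProduct nums1 nums2) := by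
  unfold Pre_maxDotProduct; infer_instance

def pvWitness_maxDotProduct : List Int × List Int := ([2, 1, -2, 5], [3, 0, -6])

def Spec_maxDotProduct (nums1 : List Int) (nums2 : List Int) (out : Int) : Prop := out = maxDotProduct_alt nums1 nums2
instance (nums1 : List Int) (nums2 : List Int) (out : Int) : Decidable (Spec_maxDotProduct nums1 nums2 out) := by unfold Spec_maxDotProduct; infer_instance

-- ===== CLAIM (what is proved, stated in full; the proofs are below) =====
def Claim_equal_maxDotProduct : Prop := ∀ (nums1 : List Int) (nums2 : List Int), Dom_maxDotProduct nums1 nums2 → Pre_maxDotProduct nums1 nums2 → Spec_maxDotProduct nums1 nums2 (maxDotProduct nums1 nums2)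

-- ===== LEMMAS AND PROOFS =====

-- the common recurrence, mirroring A's table cell by cell
def pvG (a b : List Int) : Nat → Nat → Int
  | 0, 0 => a.getD 0 0 * b.getD 0 0
  | i+1, 0 => max (pvG a b i 0) (a.getD (i+1) 0 * b.getD 0 0)
  | 0, j+1 => max (pvG a b 0 j) (a.getD 0 0 * b.getD (j+1) 0)
  | i+1, j+1 =>
      max (max (max (pvG a b i (j+1)) (pvG a b (i+1) j))
        (pvG a b i j + a.getD (i+1) 0 * b.getD (j+1) 0))
        (a.getD (i+1) 0 * b.getD (j+1) 0)

-- ---------- B side ----------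
theorem pvComb2 (p u : Int) : (if u > p then u else p) = max u p := by
  split_ifs <;> omega

theorem pvComb (p e u l : Int) :
    (if l > (if u > (if e > 0 then p + e else p) then u else (if e > 0 then p + e else p)) then l
     else (if u > (if e > 0 then p + e else p) then u else (if e > 0 then p + e else p)))
    = max (max (max u l) (e + p)) p := by
  split_ifs <;> omega

theorem altDp_neg_left (a b : List Int) (j : Int) : altDp a b (-1) j = none := by
  rw [altDp]; simp

theorem altDp_neg_right (a b : List Int) (i : Int) : altDp a b i (-1) = none := by
  rw [altDp]; simp

theorem altDp_eq (a b : List Int) : ∀ i j : Nat, altDp a b (i : Int) (j : Int) = some (pvG a b i j) := by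
  intro i j
  induction hn : i + j using Nat.strong_induction_on generalizing i j with
  | _ s ih =>
    subst hn
    have hcond : ¬((i : Int) < 0 ∨ (j : Int) < 0) := by omega
    match i, j with
    | 0, 0 =>
      rw [altDp, if_neg hcond]
      simp only [show ((0:Nat):Int) - 1 = -1 by omega, altDp_neg_left, altDp_neg_right]
      rw [PySem.List.pyGetD_natCast, PySem.List.pyGetD_natCast]
      conv_rhs => rw [pvG]
    | i+1, 0 =>
      rw [altDp, if_neg hcond]
      have h1 : ((i+1 : Nat) : Int) - 1 = ((i : Nat) : Int) := by push_cast; ring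
      have h2 : ((0 : Nat) : Int) - 1 = -1 := by omega
      rw [h1, h2, altDp_neg_right, altDp_neg_right,
        ih (i + 0) (by omega) i 0 rfl,
        PySem.List.pyGetD_natCast, PySem.List.pyGetD_natCast]
      simp only
      refine congrArg some ?_
      rw [pvG]
      exact pvComb2 (a.getD (i+1) 0 * b.getD 0 0) (pvG a b i 0)
    | 0, j+1 =>
      rw [altDp, if_neg hcond]
      have h1 : ((j+1 : Nat) : Int) - 1 = ((j : Nat) : Int) := by push_cast; ring
      have h2 : ((0 : Nat) : Int) - 1 = -1 := by omega
      rw [h1, h2, altDp_neg_left, altDp_neg_left,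
        ih (0 + j) (by omega) 0 j rfl,
        PySem.List.pyGetD_natCast, PySem.List.pyGetD_natCast]
      simp only
      refine congrArg some ?_
      rw [pvG]
      exact pvComb2 (a.getD 0 0 * b.getD (j+1) 0) (pvG a b 0 j)
    | i+1, j+1 =>
      rw [altDp, if_neg hcond]
      have h1 : ((i+1 : Nat) : Int) - 1 = ((i : Nat) : Int) := by push_cast; ring
      have h2 : ((j+1 : Nat) : Int) - 1 = ((j : Nat) : Int) := by push_cast; ring
      rw [h1, h2,
        ih (i + j) (by omega) i j rfl,
        ih (i + (j+1)) (by omega) i (j+1) rfl,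
        ih ((i+1) + j) (by omega) (i+1) j rfl,
        PySem.List.pyGetD_natCast, PySem.List.pyGetD_natCast]
      simp only
      refine congrArg some ?_
      rw [pvG]
      exact pvComb (a.getD (i+1) 0 * b.getD (j+1) 0) (pvG a b i j) (pvG a b i (j+1)) (pvG a b (i+1) j)

theorem B_eq_g' (a b : List Int) (ha : a ≠ []) (hb : b ≠ []) :
    maxDotProduct_alt a b = pvG a b (a.length - 1) (b.length - 1) := by
  have hn : 0 < a.length := List.length_pos_iff.mpr ha
  have hm : 0 < b.length := List.length_pos_iff.mpr hb
  unfold maxDotProduct_alt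
  have hc1 : ((a.length : Int) - 1) = (((a.length - 1 : Nat)) : Int) := by omega
  have hc2 : ((b.length : Int) - 1) = (((b.length - 1 : Nat)) : Int) := by omega
  rw [hc1, hc2, altDp_eq]

-- ---------- A side ----------
def pvGN (dp : List (List Int)) (i j : Nat) : Int := (dp.getD i []).getD j 0

def pvSetN (dp : List (List Int)) (i j : Nat) (v : Int) : List (List Int) :=
  dp.set i ((dp.getD i []).set j v)

theorem pvGet2_cast (dp : List (List Int)) (i j : Nat) :
    pvGet2 dp (i : Int) (j : Int) = pvGN dp i j := by
  simp [pvGet2, pvGN, PySem.List.pyGet?_natCast, List.getD_eq_getElem?_getD]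

theorem pvSet2_cast (dp : List (List Int)) (i j : Nat) (v : Int) :
    pvSet2 dp (i : Int) (j : Int) v = pvSetN dp i j v := by
  simp [pvSet2, pvSetN, PySem.List.pyGet?_natCast, List.getD_eq_getElem?_getD]

def pvRect (dp : List (List Int)) (n m : Nat) : Prop :=
  dp.length = n ∧ ∀ r ∈ dp, r.length = m

theorem pvRow_len {dp : List (List Int)} {n m : Nat} (h : pvRect dp n m)
    {i : Nat} (hi : i < n) : (dp.getD i []).length = m := by
  have hlen : i < dp.length := by rw [h.1]; exact hi
  rw [List.getD_eq_getElem?_getD, List.getElem?_eq_getElem hlen]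
  exact h.2 _ (List.getElem_mem hlen)

theorem pvRect_set {dp : List (List Int)} {n m : Nat} (h : pvRect dp n m)
    {i : Nat} (hi : i < n) (j : Nat) (v : Int) : pvRect (pvSetN dp i j v) n m := by
  refine ⟨by simp [pvSetN, h.1], ?_⟩
  intro r hr
  rcases List.mem_or_eq_of_mem_set hr with h1 | h2
  · exact h.2 r h1
  · subst h2
    rw [List.length_set]
    exact pvRow_len h hi

theorem pvGN_set_same {dp : List (List Int)} {n m : Nat} (h : pvRect dp n m)
    {i j : Nat} (hi : i < n) (hj : j < m) (v : Int) :
    pvGN (pvSetN dp i j v) i j = v := by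
  have hlen : i < dp.length := by rw [h.1]; exact hi
  have hrow : j < (dp[i]?.getD []).length := by
    rw [← List.getD_eq_getElem?_getD, pvRow_len h hi]; exact hj
  simp [pvGN, pvSetN, List.getD_eq_getElem?_getD,
    List.getElem?_set_self (by simpa using hlen),
    List.getElem?_set_self hrow]

theorem pvGN_set_ne {dp : List (List Int)} {i j i' j' : Nat}
    (hne : ¬(i' = i ∧ j' = j)) (v : Int) :
    pvGN (pvSetN dp i j v) i' j' = pvGN dp i' j' := by
  by_cases hi : i' = i
  · subst hi
    have hj : j' ≠ j := fun hj => hne ⟨rfl, hj⟩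
    by_cases hlen : i' < dp.length
    · simp [pvGN, pvSetN, List.getD_eq_getElem?_getD,
        List.getElem?_set_self (by simpa using hlen),
        List.getElem?_set_ne (Ne.symm hj)]
    · rw [pvSetN, List.set_eq_of_length_le (by omega)]
  · simp [pvGN, pvSetN, List.getD_eq_getElem?_getD, List.getElem?_set_ne (Ne.symm hi)]

def pvStep2 (nums1 nums2 : List Int) (dp : List (List Int)) (i : Int) : List (List Int) :=
  pvSet2 dp i 0 (max (pvGet2 dp (i-1) 0)
    (PySem.List.pyGetD nums1 i 0 * PySem.List.pyGetD nums2 0 0))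

def pvStep3 (nums1 nums2 : List Int) (dp : List (List Int)) (i : Int) : List (List Int) :=
  pvSet2 dp 0 i (max (pvGet2 dp 0 (i-1))
    (PySem.List.pyGetD nums1 0 0 * PySem.List.pyGetD nums2 i 0))

def pvStep4 (nums1 nums2 : List Int) (i : Int) (dp : List (List Int)) (j : Int) : List (List Int) :=
  pvSet2 dp i j (max (max (max (pvGet2 dp (i-1) j) (pvGet2 dp i (j-1)))
      (pvGet2 dp (i-1) (j-1) + PySem.List.pyGetD nums1 i 0 * PySem.List.pyGetD nums2 j 0))
      (PySem.List.pyGetD nums1 i 0 * PySem.List.pyGetD nums2 j 0))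

def pvTab (nums1 nums2 : List Int) : List (List Int) :=
  let n : Int := nums1.length
  let m : Int := nums2.length
  let dp : List (List Int) := List.replicate n.toNat (List.replicate m.toNat 0)
  let dp := pvSet2 dp 0 0 (PySem.List.pyGetD nums1 0 0 * PySem.List.pyGetD nums2 0 0)
  let dp := (PySem.List.pyRange 1 n 1).foldl (pvStep2 nums1 nums2) dp
  let dp := (PySem.List.pyRange 1 m 1).foldl (pvStep3 nums1 nums2) dp
  (PySem.List.pyRange 1 n 1).foldl (fun dp i => (PySem.List.pyRange 1 m 1).foldl (pvStep4 nums1 nums2 i) dp) dp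

theorem A_def (a b : List Int) :
    maxDotProduct a b = pvGet2 (pvTab a b) ((a.length : Int) - 1) ((b.length : Int) - 1) := rfl

theorem pyfold_nat {α : Type} (f : α → Int → α) (n : Nat) (init : α) :
    (PySem.List.pyRange 1 (n : Int) 1).foldl f init
      = (List.range (n - 1)).foldl (fun (s : α) (k : Nat) => f s ((k : Int) + 1)) init := by
  rw [PySem.List.pyRange_one]
  have h1 : ((n : Int) - 1).toNat = n - 1 := by omega
  rw [h1, List.foldl_map]
  have h2 : (fun (s : α) (k : Nat) => f s (1 + (k : Int))) = (fun (s : α) (k : Nat) => f s ((k : Int) + 1)) := by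
    funext s k; rw [Int.add_comm]
  rw [h2]

theorem step2_nat (a b : List Int) (dp : List (List Int)) (k : Nat) :
    pvStep2 a b dp ((k : Int) + 1)
      = pvSetN dp (k+1) 0 (max (pvGN dp k 0) (a.getD (k+1) 0 * b.getD 0 0)) := by
  unfold pvStep2
  have h1 : ((k : Int) + 1) - 1 = ((k : Nat) : Int) := by ring
  have h2 : ((k : Int) + 1) = (((k+1 : Nat)) : Int) := by push_cast; ring
  have h0 : (0 : Int) = ((0 : Nat) : Int) := rfl
  rw [h1, h2, h0, pvGet2_cast, pvSet2_cast, PySem.List.pyGetD_natCast, PySem.List.pyGetD_natCast]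

theorem step3_nat (a b : List Int) (dp : List (List Int)) (k : Nat) :
    pvStep3 a b dp ((k : Int) + 1)
      = pvSetN dp 0 (k+1) (max (pvGN dp 0 k) (a.getD 0 0 * b.getD (k+1) 0)) := by
  unfold pvStep3
  have h1 : ((k : Int) + 1) - 1 = ((k : Nat) : Int) := by ring
  have h2 : ((k : Int) + 1) = (((k+1 : Nat)) : Int) := by push_cast; ring
  have h0 : (0 : Int) = ((0 : Nat) : Int) := rfl
  rw [h1, h2, h0, pvGet2_cast, pvSet2_cast, PySem.List.pyGetD_natCast, PySem.List.pyGetD_natCast]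

theorem step4_nat (a b : List Int) (dp : List (List Int)) (k u : Nat) :
    pvStep4 a b ((k : Int) + 1) dp ((u : Int) + 1)
      = pvSetN dp (k+1) (u+1)
          (max (max (max (pvGN dp k (u+1)) (pvGN dp (k+1) u))
            (pvGN dp k u + a.getD (k+1) 0 * b.getD (u+1) 0))
            (a.getD (k+1) 0 * b.getD (u+1) 0)) := by
  unfold pvStep4
  have h1 : ((k : Int) + 1) - 1 = ((k : Nat) : Int) := by ring
  have h2 : ((k : Int) + 1) = (((k+1 : Nat)) : Int) := by push_cast; ring
  have h3 : ((u : Int) + 1) - 1 = ((u : Nat) : Int) := by ring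
  have h4 : ((u : Int) + 1) = (((u+1 : Nat)) : Int) := by push_cast; ring
  rw [h1, h3, h2, h4, pvGet2_cast, pvGet2_cast, pvGet2_cast, pvSet2_cast,
    PySem.List.pyGetD_natCast, PySem.List.pyGetD_natCast]

theorem phase2_inv (a b : List Int) (dp : List (List Int))
    (hrect : pvRect dp a.length b.length) (hm : 0 < b.length)
    (h00 : pvGN dp 0 0 = pvG a b 0 0) :
    ∀ t, t ≤ a.length - 1 →
      pvRect ((List.range t).foldl (fun (s : List (List Int)) (k : Nat) => pvStep2 a b s ((k : Int) + 1)) dp) a.length b.length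
      ∧ (∀ i, i ≤ t →
          pvGN ((List.range t).foldl (fun (s : List (List Int)) (k : Nat) => pvStep2 a b s ((k : Int) + 1)) dp) i 0 = pvG a b i 0)
      ∧ (∀ i j, (i = 0 ∨ t < i ∨ j ≠ 0) →
          pvGN ((List.range t).foldl (fun (s : List (List Int)) (k : Nat) => pvStep2 a b s ((k : Int) + 1)) dp) i j = pvGN dp i j) := by
  intro t
  induction t with
  | zero =>
    intro _
    refine ⟨by simpa using hrect, ?_, by intro i j _; simp⟩
    intro i hi
    have hi0 : i = 0 := by omega
    subst hi0
    simpa using h00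
  | succ t ih =>
    intro ht
    obtain ⟨R, C, F⟩ := ih (by omega)
    rw [List.range_succ, List.foldl_append, List.foldl_cons, List.foldl_nil, step2_nat]
    have hn1 : t + 1 < a.length := by omega
    refine ⟨pvRect_set R hn1 _ _, ?_, ?_⟩
    · intro i hi
      by_cases hit : i = t + 1
      · subst hit
        rw [pvGN_set_same R hn1 hm, C t (by omega)]
        conv_rhs => rw [pvG]
      · rw [pvGN_set_ne (by omega)]
        exact C i (by omega)
    · intro i j hcond
      rw [pvGN_set_ne (by omega)]
      exact F i j (by omega)

theorem phase3_inv (a b : List Int) (dp : List (List Int))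
    (hrect : pvRect dp a.length b.length) (hn : 0 < a.length)
    (h00 : pvGN dp 0 0 = pvG a b 0 0) :
    ∀ t, t ≤ b.length - 1 →
      pvRect ((List.range t).foldl (fun (s : List (List Int)) (k : Nat) => pvStep3 a b s ((k : Int) + 1)) dp) a.length b.length
      ∧ (∀ j, j ≤ t →
          pvGN ((List.range t).foldl (fun (s : List (List Int)) (k : Nat) => pvStep3 a b s ((k : Int) + 1)) dp) 0 j = pvG a b 0 j)
      ∧ (∀ i j, (j = 0 ∨ t < j ∨ i ≠ 0) →
          pvGN ((List.range t).foldl (fun (s : List (List Int)) (k : Nat) => pvStep3 a b s ((k : Int) + 1)) dp) i j = pvGN dp i j) := by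
  intro t
  induction t with
  | zero =>
    intro _
    refine ⟨by simpa using hrect, ?_, by intro i j _; simp⟩
    intro j hj
    have hj0 : j = 0 := by omega
    subst hj0
    simpa using h00
  | succ t ih =>
    intro ht
    obtain ⟨R, C, F⟩ := ih (by omega)
    rw [List.range_succ, List.foldl_append, List.foldl_cons, List.foldl_nil, step3_nat]
    have hm1 : t + 1 < b.length := by omega
    refine ⟨pvRect_set R hn _ _, ?_, ?_⟩
    · intro j hj
      by_cases hjt : j = t + 1
      · subst hjt
        rw [pvGN_set_same R hn hm1, C t (by omega)]
        conv_rhs => rw [pvG]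
      · rw [pvGN_set_ne (by omega)]
        exact C j (by omega)
    · intro i j hcond
      rw [pvGN_set_ne (by omega)]
      exact F i j (by omega)

def pvS (nl ml t i j : Nat) : Prop :=
  (i = 0 ∧ j ≤ ml - 1) ∨ (j = 0 ∧ i ≤ nl - 1) ∨ (1 ≤ i ∧ i ≤ t ∧ 1 ≤ j ∧ j ≤ ml - 1)

theorem phase4_row (a b : List Int) (k : Nat) (hk : k + 1 ≤ a.length - 1)
    (dp : List (List Int)) (hrect : pvRect dp a.length b.length)
    (hcorr : ∀ i j, pvS a.length b.length k i j → pvGN dp i j = pvG a b i j) :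
    ∀ u, u ≤ b.length - 1 →
      pvRect ((List.range u).foldl (fun (s : List (List Int)) (v : Nat) => pvStep4 a b ((k : Int) + 1) s ((v : Int) + 1)) dp)
        a.length b.length
      ∧ (∀ i j, (pvS a.length b.length k i j ∨ (i = k + 1 ∧ 1 ≤ j ∧ j ≤ u)) →
          pvGN ((List.range u).foldl (fun (s : List (List Int)) (v : Nat) => pvStep4 a b ((k : Int) + 1) s ((v : Int) + 1)) dp) i j
            = pvG a b i j) := by
  intro u
  induction u with
  | zero =>
    intro _
    refine ⟨by simpa using hrect, ?_⟩
    intro i j hij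
    rcases hij with h | h
    · simpa using hcorr i j h
    · omega
  | succ u ih =>
    intro hu
    obtain ⟨R, C⟩ := ih (by omega)
    rw [List.range_succ, List.foldl_append, List.foldl_cons, List.foldl_nil, step4_nat]
    have hn1 : k + 1 < a.length := by omega
    have hm1 : u + 1 < b.length := by omega
    have hup : pvGN ((List.range u).foldl (fun (s : List (List Int)) (v : Nat) => pvStep4 a b ((k : Int) + 1) s ((v : Int) + 1)) dp) k (u+1)
        = pvG a b k (u+1) := C k (u+1) (by unfold pvS; omega)
    have hleft : pvGN ((List.range u).foldl (fun (s : List (List Int)) (v : Nat) => pvStep4 a b ((k : Int) + 1) s ((v : Int) + 1)) dp) (k+1) u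
        = pvG a b (k+1) u := by
      rcases Nat.eq_zero_or_pos u with hu0 | hu0
      · subst hu0; exact C (k+1) 0 (by unfold pvS; omega)
      · exact C (k+1) u (by omega)
    have hdiag : pvGN ((List.range u).foldl (fun (s : List (List Int)) (v : Nat) => pvStep4 a b ((k : Int) + 1) s ((v : Int) + 1)) dp) k u
        = pvG a b k u := C k u (by unfold pvS; omega)
    refine ⟨pvRect_set R hn1 _ _, ?_⟩
    intro i j hij
    by_cases hit : i = k + 1 ∧ j = u + 1
    · obtain ⟨hi1, hj1⟩ := hit
      subst hi1; subst hj1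
      rw [pvGN_set_same R hn1 hm1, hup, hleft, hdiag]
      conv_rhs => rw [pvG]
    · rw [pvGN_set_ne hit]
      refine C i j ?_
      rcases hij with h | h
      · exact Or.inl h
      · right; omega

theorem phase4_all (a b : List Int) (dp : List (List Int))
    (hrect : pvRect dp a.length b.length)
    (hcorr : ∀ i j, pvS a.length b.length 0 i j → pvGN dp i j = pvG a b i j) :
    ∀ t, t ≤ a.length - 1 →
      pvRect ((List.range t).foldl
          (fun (s : List (List Int)) (k : Nat) => (List.range (b.length - 1)).foldl
            (fun (s' : List (List Int)) (v : Nat) => pvStep4 a b ((k : Int) + 1) s' ((v : Int) + 1)) s) dp) a.length b.length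
      ∧ (∀ i j, pvS a.length b.length t i j →
          pvGN ((List.range t).foldl
            (fun (s : List (List Int)) (k : Nat) => (List.range (b.length - 1)).foldl
              (fun (s' : List (List Int)) (v : Nat) => pvStep4 a b ((k : Int) + 1) s' ((v : Int) + 1)) s) dp) i j = pvG a b i j) := by
  intro t
  induction t with
  | zero => intro _; exact ⟨by simpa using hrect, by simpa using hcorr⟩
  | succ t ih =>
    intro ht
    obtain ⟨R, C⟩ := ih (by omega)
    rw [List.range_succ, List.foldl_append, List.foldl_cons, List.foldl_nil]
    have hrow := phase4_row a b t (by omega) _ R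
      (fun i j h => C i j (by unfold pvS at h ⊢; omega)) (b.length - 1) (by omega)
    refine ⟨hrow.1, ?_⟩
    intro i j hij
    refine hrow.2 i j ?_
    unfold pvS at hij ⊢
    omega

theorem A_eq_g' (a b : List Int) (ha : a ≠ []) (hb : b ≠ []) :
    maxDotProduct a b = pvG a b (a.length - 1) (b.length - 1) := by
  have hn : 0 < a.length := List.length_pos_iff.mpr ha
  have hm : 0 < b.length := List.length_pos_iff.mpr hb
  rw [A_def]
  unfold pvTab
  simp only [Int.toNat_natCast]
  rw [pyfold_nat, pyfold_nat, pyfold_nat]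
  have hfun : (fun (s : List (List Int)) (k : Nat) =>
        (fun (dp : List (List Int)) (i : Int) => (PySem.List.pyRange 1 (b.length : Int) 1).foldl (pvStep4 a b i) dp) s ((k : Int) + 1))
      = (fun (s : List (List Int)) (k : Nat) => (List.range (b.length - 1)).foldl
          (fun (s' : List (List Int)) (v : Nat) => pvStep4 a b ((k : Int) + 1) s' ((v : Int) + 1)) s) := by
    funext s k
    show (PySem.List.pyRange 1 (b.length : Int) 1).foldl (pvStep4 a b ((k : Int) + 1)) s = _
    rw [pyfold_nat]
  rw [hfun]
  have hdp1 : pvSet2 (List.replicate a.length (List.replicate b.length 0)) 0 0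
        (PySem.List.pyGetD a 0 0 * PySem.List.pyGetD b 0 0)
      = pvSetN (List.replicate a.length (List.replicate b.length 0)) 0 0 (a.getD 0 0 * b.getD 0 0) := by
    rw [show (0 : Int) = ((0 : Nat) : Int) from rfl, pvSet2_cast,
      PySem.List.pyGetD_natCast, PySem.List.pyGetD_natCast]
  rw [hdp1]
  have rect0 : pvRect (List.replicate a.length (List.replicate b.length 0)) a.length b.length := by
    refine ⟨by simp, ?_⟩
    intro r hr
    rw [List.eq_of_mem_replicate hr]
    simp
  have rect1 := pvRect_set rect0 hn 0 (a.getD 0 0 * b.getD 0 0)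
  have h00 : pvGN (pvSetN (List.replicate a.length (List.replicate b.length 0)) 0 0
      (a.getD 0 0 * b.getD 0 0)) 0 0 = pvG a b 0 0 := by
    rw [pvGN_set_same rect0 hn hm]
    conv_rhs => rw [pvG]
  obtain ⟨R2, C2, F2⟩ := phase2_inv a b _ rect1 hm h00 (a.length - 1) le_rfl
  have h002 := F2 0 0 (Or.inl rfl)
  rw [h00] at h002
  obtain ⟨R3, C3, F3⟩ := phase3_inv a b _ R2 hn h002 (b.length - 1) le_rfl
  obtain ⟨R4, C4⟩ := phase4_all a b _ R3 (fun i j hij => by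
    unfold pvS at hij
    rcases hij with ⟨hi, hj⟩ | ⟨hj, hi⟩ | h
    · subst hi; exact C3 j hj
    · subst hj; rw [F3 i 0 (Or.inl rfl)]; exact C2 i hi
    · omega) (a.length - 1) le_rfl
  have hcast1 : ((a.length : Int) - 1) = (((a.length - 1 : Nat)) : Int) := by omega
  have hcast2 : ((b.length : Int) - 1) = (((b.length - 1 : Nat)) : Int) := by omega
  rw [hcast1, hcast2, pvGet2_cast]
  exact C4 (a.length - 1) (b.length - 1) (by unfold pvS; omega)

-- ===== VERDICT (by name: the statement is the Claim_ definition above) =====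
theorem maxDotProduct_spec : Claim_equal_maxDotProduct := by
  intro nums1 nums2 _ hpre
  unfold Spec_maxDotProduct
  rw [A_eq_g' nums1 nums2 hpre.1 hpre.2, B_eq_g' nums1 nums2 hpre.1 hpre.2]
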